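-- pv_equiv track=rewrite | github.com/DamianDuy1302/PTIT-Python | PY01039-KiemTraSoDep.py | pas
-- ===== SOURCE A (Python) =====
-- def pas(n):
--     if(len(n)%2==0):
--         n=n+n[0]
--     for i in range(2, len(n), 2):
--         if(n[i]!=n[i-2]):
--             return "NO"
--     for i in range(3, len(n)-1, 2):
--         if(n[i]!=n[i-2]):
--             return "NO"
--     return "YES"
-- ===== SOURCE B (Python) =====
-- def pas(n):
--     if len(n) % 2 == 0:
--         n = n + n[0]
--     return "YES" if n[2:] == n[:-2] else "NO"
-- ===== Notes on version B (the rewrite author's own statement) =====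
-- stated objective: simpler
-- what changed: keeps the same length normalization but replaces A's two stride-2 index loops with a single shift-by-two whole-string slice comparison n[2:] == n[:-2]
import Mathlib
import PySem

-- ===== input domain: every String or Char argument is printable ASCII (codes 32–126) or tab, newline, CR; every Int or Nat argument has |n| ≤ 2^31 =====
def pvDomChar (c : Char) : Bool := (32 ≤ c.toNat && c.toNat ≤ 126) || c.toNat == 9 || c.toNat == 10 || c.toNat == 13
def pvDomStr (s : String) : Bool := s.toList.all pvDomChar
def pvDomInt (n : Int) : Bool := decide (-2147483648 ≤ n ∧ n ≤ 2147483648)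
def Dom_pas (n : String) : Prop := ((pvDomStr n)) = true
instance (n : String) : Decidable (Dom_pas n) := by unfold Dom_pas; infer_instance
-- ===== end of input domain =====

-- B keeps A's normalization step but replaces the two stride-2 pairwise loops by one
-- shift-by-two slice comparison (simpler); Pre_ excludes only "" where both raise IndexError.


-- ===== PORT A =====
-- the two 'for i in range(…, …, 2): if n[i] != n[i-2]: return "NO"' loops, early return as Option
def pasLoop (l : List Char) : List Int → Option String
  | [] => none
  | i :: rest =>
    if PySem.List.pyGetD l i ' ' ≠ PySem.List.pyGetD l (i - 2) ' ' then some "NO"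
    else pasLoop l rest

def pasCore (l : List Char) : String :=
  match pasLoop l (PySem.List.pyRange 2 (l.length : Int) 2) with
  | some r => r
  | none =>
    match pasLoop l (PySem.List.pyRange 3 ((l.length : Int) - 1) 2) with
    | some r => r
    | none => "YES"

def pas (n : String) : String :=
  let l0 := n.toList
  pasCore (if l0.length % 2 = 0 then l0 ++ [PySem.List.pyGetD l0 0 ' '] else l0)

-- ===== PORT B =====
def pasAltCore (l : List Char) : String :=
  if PySem.List.slice l (some 2) none = PySem.List.slice l none (some (-2)) then "YES" else "NO"

def pas_alt (n : String) : String :=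
  let l0 := n.toList
  pasAltCore (if l0.length % 2 = 0 then l0 ++ [PySem.List.pyGetD l0 0 ' '] else l0)

-- ===== PRECONDITION & SPEC =====
-- Pre_ excludes only the empty string, on which A (and B) raise IndexError at n[0].
def Pre_pas (n : String) : Prop := n.toList ≠ []
instance (n : String) : Decidable (Pre_pas n) := by unfold Pre_pas; infer_instance

def pvWitness_pas : String := "aba"

def Spec_pas (n : String) (out : String) : Prop := out = pas_alt n
instance (n : String) (out : String) : Decidable (Spec_pas n out) := by unfold Spec_pas; infer_instance

-- ===== CLAIM (what is proved, stated in full; the proofs are below) =====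
def Claim_equal_pas : Prop := ∀ (n : String), Dom_pas n → Pre_pas n → Spec_pas n (pas n)

-- ===== LEMMAS AND PROOFS =====

theorem pasLoop_eq_none_iff (l : List Char) (is : List Int) :
    pasLoop l is = none ↔
      ∀ i ∈ is, PySem.List.pyGetD l i ' ' = PySem.List.pyGetD l (i - 2) ' ' := by
  induction is with
  | nil => simp [pasLoop]
  | cons i rest ih =>
    by_cases h : PySem.List.pyGetD l i ' ' = PySem.List.pyGetD l (i - 2) ' ' <;>
      simp [pasLoop, h, ih]

theorem pasLoop_cases (l : List Char) (is : List Int) :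
    pasLoop l is = none ∨ pasLoop l is = some "NO" := by
  induction is with
  | nil => simp [pasLoop]
  | cons i rest ih =>
    by_cases h : PySem.List.pyGetD l i ' ' = PySem.List.pyGetD l (i - 2) ' ' <;>
      simp [pasLoop, h, ih]

-- drop/take shift equality ↔ pointwise period-2 condition
theorem shift_iff (l : List Char) :
    l.drop 2 = l.take (l.length - 2) ↔
      ∀ (j : Nat) (hj : j + 2 < l.length), l[j + 2]'hj = l[j]'(by omega) := by
  constructor
  · intro h j hj
    have h1 : j < (l.drop 2).length := by simp only [List.length_drop]; omega
    have := List.getElem_of_eq h h1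
    simpa [List.getElem_drop, List.getElem_take, Nat.add_comm] using this
  · intro h
    apply List.ext_getElem
    · simp only [List.length_drop, List.length_take]; omega
    · intro i h1 h2
      have hi : i + 2 < l.length := by simp at h1; omega
      have := h i hi
      simp only [List.getElem_drop, List.getElem_take]
      simpa [Nat.add_comm] using this

-- the two parity loops together say exactly "period 2 everywhere" when the length is odd
theorem key (l : List Char) (hodd : l.length % 2 = 1) :
    ((∀ i ∈ PySem.List.pyRange 2 (l.length : Int) 2,
        PySem.List.pyGetD l i ' ' = PySem.List.pyGetD l (i - 2) ' ') ∧
     (∀ i ∈ PySem.List.pyRange 3 ((l.length : Int) - 1) 2,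
        PySem.List.pyGetD l i ' ' = PySem.List.pyGetD l (i - 2) ' ')) ↔
      l.drop 2 = l.take (l.length - 2) := by
  rw [shift_iff]
  constructor
  · rintro ⟨h1, h2⟩ j hj
    have hget : PySem.List.pyGetD l ((j : Int) + 2) ' '
        = PySem.List.pyGetD l (((j : Int) + 2) - 2) ' ' := by
      rcases Nat.even_or_odd j with he | ho
      · apply h1
        rw [PySem.List.mem_pyRange_iff_of_pos (by omega)]
        obtain ⟨k, hk⟩ := he
        refine ⟨by omega, by exact_mod_cast (by omega : (j : Int) + 2 < l.length), ⟨k, by omega⟩⟩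
      · apply h2
        rw [PySem.List.mem_pyRange_iff_of_pos (by omega)]
        obtain ⟨k, hk⟩ := ho
        have hjm : j + 2 < l.length - 1 := by omega
        refine ⟨by omega, by exact_mod_cast (by omega : (j : Int) + 2 < (l.length : Int) - 1),
          ⟨k, by omega⟩⟩
    rw [PySem.List.pyGetD_eq_getElem l ' ' (by omega) (by exact_mod_cast hj),
        PySem.List.pyGetD_eq_getElem l ' ' (by omega)
          (by omega)] at hget
    have e1 : ((j : Int) + 2).toNat = j + 2 := by omega
    have e2 : (((j : Int) + 2) - 2).toNat = j := by omega
    simpa [e1, e2] using hget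
  · intro h
    constructor <;> intro i hi <;>
      rw [PySem.List.mem_pyRange_iff_of_pos (by omega)] at hi
    · obtain ⟨hlo, hhi, hdvd⟩ := hi
      have hj : (i - 2).toNat + 2 < l.length := by omega
      have := h (i - 2).toNat hj
      rw [PySem.List.pyGetD_eq_getElem l ' ' (by omega) (by omega),
          PySem.List.pyGetD_eq_getElem l ' ' (by omega) (by omega)]
      have e1 : i.toNat = (i - 2).toNat + 2 := by omega
      simpa [e1] using this
    · obtain ⟨hlo, hhi, hdvd⟩ := hi
      have hj : (i - 2).toNat + 2 < l.length := by omega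
      have := h (i - 2).toNat hj
      rw [PySem.List.pyGetD_eq_getElem l ' ' (by omega) (by omega),
          PySem.List.pyGetD_eq_getElem l ' ' (by omega) (by omega)]
      have e1 : i.toNat = (i - 2).toNat + 2 := by omega
      simpa [e1] using this

-- ===== VERDICT (by name: the statement is the Claim_ definition above) =====
theorem pasCore_eq (l : List Char) (hodd : l.length % 2 = 1) :
    pasCore l = pasAltCore l := by
  unfold pasCore pasAltCore
  have hslice : (PySem.List.slice l (some 2) none = PySem.List.slice l none (some (-2)))
      ↔ l.drop 2 = l.take (l.length - 2) := by
    rw [PySem.List.slice_to_neg_ofNat l 2 (by omega),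
        show ((2 : Int)) = ((2 : Nat) : Int) from rfl, PySem.List.slice_from_natCast]
  have hk := key l hodd
  rcases pasLoop_cases l (PySem.List.pyRange 2 (l.length : Int) 2) with h1 | h1
  · rcases pasLoop_cases l (PySem.List.pyRange 3 ((l.length : Int) - 1) 2) with h2 | h2
    · rw [h1, h2]
      rw [pasLoop_eq_none_iff] at h1 h2
      rw [if_pos (hslice.mpr (hk.mp ⟨h1, h2⟩))]
    · rw [h1, h2]
      have hne : ¬ l.drop 2 = l.take (l.length - 2) := by
        intro hd
        have hb := (pasLoop_eq_none_iff l _).mpr (hk.mpr hd).2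
        rw [h2] at hb
        exact absurd hb (by simp)
      rw [if_neg (fun hs => hne (hslice.mp hs))]
  · rw [h1]
    have hne : ¬ l.drop 2 = l.take (l.length - 2) := by
      intro hd
      have hb := (pasLoop_eq_none_iff l _).mpr (hk.mpr hd).1
      rw [h1] at hb
      exact absurd hb (by simp)
    rw [if_neg (fun hs => hne (hslice.mp hs))]

theorem norm_length_odd (l0 : List Char) :
    (if l0.length % 2 = 0 then l0 ++ [PySem.List.pyGetD l0 0 ' '] else l0).length % 2 = 1 := by
  split <;> rename_i h
  · simp only [List.length_append, List.length_cons, List.length_nil]; omega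
  · omega

theorem pas_spec : Claim_equal_pas := by
  intro n _ _
  unfold Spec_pas pas pas_alt
  exact pasCore_eq _ (norm_length_odd n.toList)
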